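-- pv_equiv track=rewrite | github.com/Minhmama-fisch/CSB04 | bài tập 7/cau1.py | so_chan_hoan_hao
-- ===== SOURCE A (Python) =====
-- def so_chan_hoan_hao(n):
--     if n <= 0:
--         return False
--     tong_uoc_so_chan = 0
--     for i in range(1, n):
--         if n % i == 0 and i % 2 == 0:
--             tong_uoc_so_chan += i
--     return tong_uoc_so_chan == n
-- ===== SOURCE B (Python) =====
-- def so_chan_hoan_hao(n):
--     if n <= 0:
--         return False
--     total = 0
--     i = 1
--     while i * i <= n:
--         if n % i == 0:
--             j = n // i
--             if i % 2 == 0 and i != n: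
--                 total += i
--             if j != i and j % 2 == 0 and j != n:
--                 total += j
--         i += 1
--     return total == n
-- ===== Notes on version B (the rewrite author's own statement) =====
-- stated objective: faster
-- what changed: B enumerates divisors in pairs (i, n//i) for i up to sqrt(n) instead of scanning every i in range(1, n), summing the even proper divisors of each pair once.
import Mathlib
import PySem

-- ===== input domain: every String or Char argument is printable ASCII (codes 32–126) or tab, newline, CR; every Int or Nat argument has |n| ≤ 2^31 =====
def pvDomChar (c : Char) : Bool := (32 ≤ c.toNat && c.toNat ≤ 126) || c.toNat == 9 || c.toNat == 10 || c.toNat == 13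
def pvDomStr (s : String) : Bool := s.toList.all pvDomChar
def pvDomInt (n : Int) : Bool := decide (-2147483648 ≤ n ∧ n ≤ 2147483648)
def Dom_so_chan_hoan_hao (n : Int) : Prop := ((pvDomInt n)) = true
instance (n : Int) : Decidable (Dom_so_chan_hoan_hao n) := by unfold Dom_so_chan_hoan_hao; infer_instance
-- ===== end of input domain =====

-- B replaces A's O(n) scan of range(1, n) by the O(√n) paired enumeration of divisors up to √n (objective: faster).

-- ===== PORT A =====
def so_chan_hoan_hao (n : Int) : Bool :=
  if n ≤ 0 then false
  else
    let tong := (PySem.List.pyRange 1 n 1).foldl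
      (fun acc i => if PySem.Int.mod n i == 0 && PySem.Int.mod i 2 == 0 then acc + i else acc) 0
    tong == n

-- ===== PORT B =====
-- the 'while i * i <= n' loop of Source B; terminates because i*i ≤ n forces i ≤ n
def soChanAltLoop (n i total : Int) : Int :=
  if _h : i * i ≤ n then
    let total' :=
      if PySem.Int.mod n i == 0 then
        let j := PySem.Int.floordiv n i
        let t1 := if PySem.Int.mod i 2 == 0 && i != n then total + i else total
        if j != i && PySem.Int.mod j 2 == 0 && j != n then t1 + j else t1
      else total
    soChanAltLoop n (i + 1) total'
  else total
termination_by (n + 1 - i).toNat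
decreasing_by
  have hin : i ≤ n := by
    by_cases h0 : i ≤ 0
    · have := mul_self_nonneg i; omega
    · have h1 : (1:Int) ≤ i := by omega
      have h2 : i * 1 ≤ i * i := by
        exact mul_le_mul_of_nonneg_left h1 (by omega)
      omega
  omega

def so_chan_hoan_hao_alt (n : Int) : Bool :=
  if n ≤ 0 then false
  else soChanAltLoop n 1 0 == n

-- ===== PRECONDITION & SPEC =====
def Spec_so_chan_hoan_hao (n : Int) (out : Bool) : Prop := out = so_chan_hoan_hao_alt n
instance (n : Int) (out : Bool) : Decidable (Spec_so_chan_hoan_hao n out) := by unfold Spec_so_chan_hoan_hao; infer_instance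

-- ===== CLAIM (what is proved, stated in full; the proofs are below) =====
def Claim_equal_so_chan_hoan_hao : Prop := ∀ (n : Int), Dom_so_chan_hoan_hao n → Spec_so_chan_hoan_hao n (so_chan_hoan_hao n)

-- ===== LEMMAS AND PROOFS =====

-- value of the even-proper-divisor summand, Nat level
def fEv (N d : ℕ) : ℕ := if d % 2 = 0 ∧ d ≠ N then d else 0
-- A's per-index summand
def aEv (N i : ℕ) : ℕ := if N % i = 0 ∧ i % 2 = 0 then i else 0
-- B's per-index summand (pair at i and N/i)
def bEv (N i : ℕ) : ℕ :=
  if N % i = 0 then fEv N i + (if N / i ≠ i then fEv N (N / i) else 0) else 0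

theorem aEv_sum_eq (N : ℕ) (hN : 1 ≤ N) :
    ∑ i ∈ Finset.Ico 1 N, aEv N i = ∑ d ∈ N.divisors, fEv N d := by
  have hfilters : (Finset.Ico 1 N).filter (fun i => N % i = 0 ∧ i % 2 = 0)
      = N.divisors.filter (fun d => d % 2 = 0 ∧ d ≠ N) := by
    ext i
    simp only [Finset.mem_filter, Finset.mem_Ico, Nat.mem_divisors]
    constructor
    · rintro ⟨⟨h1, h2⟩, h3, h4⟩
      exact ⟨⟨Nat.dvd_of_mod_eq_zero h3, by omega⟩, h4, by omega⟩
    · rintro ⟨⟨hdvd, hN0⟩, h2, h3⟩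
      have hle := Nat.le_of_dvd (by omega) hdvd
      have hpos : i ≠ 0 := by rintro rfl; rw [zero_dvd_iff] at hdvd; omega
      exact ⟨⟨by omega, by omega⟩, Nat.mod_eq_zero_of_dvd hdvd, h2⟩
  calc ∑ i ∈ Finset.Ico 1 N, aEv N i
      = ∑ i ∈ (Finset.Ico 1 N).filter (fun i => N % i = 0 ∧ i % 2 = 0), i := by
        rw [Finset.sum_filter]; simp only [aEv]
    _ = ∑ d ∈ N.divisors.filter (fun d => d % 2 = 0 ∧ d ≠ N), d := by rw [hfilters]
    _ = ∑ d ∈ N.divisors, fEv N d := by rw [Finset.sum_filter]; simp only [fEv]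

theorem small_to_large (N d : ℕ) (hN : 1 ≤ N) (hd : d ∣ N) (hdS : d ≤ Nat.sqrt N)
    (hne : N / d ≠ d) : N / d ∣ N ∧ ¬ N / d ≤ Nat.sqrt N := by
  refine ⟨Nat.div_dvd_of_dvd hd, ?_⟩
  intro hle
  have hd1 : d ≠ 0 := by rintro rfl; rw [zero_dvd_iff] at hd; omega
  have h1 : d * (N / d) = N := Nat.mul_div_cancel' hd
  have h2 : d * (N / d) ≤ d * Nat.sqrt N := Nat.mul_le_mul_left d hle
  have h3 : d * Nat.sqrt N ≤ Nat.sqrt N * Nat.sqrt N := Nat.mul_le_mul_right _ hdS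
  have h4 : Nat.sqrt N * Nat.sqrt N ≤ N := Nat.sqrt_le N
  have h5 : d * Nat.sqrt N = Nat.sqrt N * Nat.sqrt N := by omega
  have h6 : d * (N / d) = d * Nat.sqrt N := by omega
  have hS1 : 0 < Nat.sqrt N := by omega
  have h7 : N / d = Nat.sqrt N := Nat.eq_of_mul_eq_mul_left (by omega) h6
  have h8 : d = Nat.sqrt N := Nat.eq_of_mul_eq_mul_right hS1 h5
  omega

theorem large_to_small (N d : ℕ) (_hN : 1 ≤ N) (hd : d ∣ N) (hdS : ¬ d ≤ Nat.sqrt N) :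
    N / d ∣ N ∧ N / d ≤ Nat.sqrt N := by
  refine ⟨Nat.div_dvd_of_dvd hd, ?_⟩
  have h1 : Nat.sqrt N + 1 ≤ d := by omega
  have h2 : N / d ≤ N / (Nat.sqrt N + 1) := Nat.div_le_div_left h1 (by omega)
  have h3 : N / (Nat.sqrt N + 1) < Nat.sqrt N + 1 :=
    (Nat.div_lt_iff_lt_mul (by omega)).2 (Nat.lt_succ_sqrt N)
  omega

theorem bEv_sum_eq (N : ℕ) (hN : 1 ≤ N) :
    ∑ i ∈ Finset.Ico 1 (Nat.sqrt N + 1), bEv N i = ∑ d ∈ N.divisors, fEv N d := by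
  have hsmall : (Finset.Ico 1 (Nat.sqrt N + 1)).filter (fun i => N % i = 0)
      = N.divisors.filter (fun d => d ≤ Nat.sqrt N) := by
    ext i
    simp only [Finset.mem_filter, Finset.mem_Ico, Nat.mem_divisors]
    constructor
    · rintro ⟨⟨h1, h2⟩, h3⟩
      exact ⟨⟨Nat.dvd_of_mod_eq_zero h3, by omega⟩, by omega⟩
    · rintro ⟨⟨hdvd, hN0⟩, h2⟩
      have hpos : i ≠ 0 := by rintro rfl; rw [zero_dvd_iff] at hdvd; omega
      exact ⟨⟨by omega, by omega⟩, Nat.mod_eq_zero_of_dvd hdvd⟩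
  have step4 : ∑ i ∈ (N.divisors.filter (fun d => d ≤ Nat.sqrt N)).filter (fun i => N / i ≠ i),
        fEv N (N / i)
      = ∑ d ∈ N.divisors.filter (fun d => ¬ d ≤ Nat.sqrt N), fEv N d := by
    apply Finset.sum_nbij' (i := fun d => N / d) (j := fun d => N / d)
    · intro a ha
      simp only [Finset.mem_filter, Nat.mem_divisors] at ha ⊢
      obtain ⟨⟨⟨hdvd, hN0⟩, hle⟩, hne⟩ := ha
      obtain ⟨q1, q2⟩ := small_to_large N a hN hdvd hle hne
      exact ⟨⟨q1, hN0⟩, q2⟩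
    · intro a ha
      simp only [Finset.mem_filter, Nat.mem_divisors] at ha ⊢
      obtain ⟨⟨hdvd, hN0⟩, hgt⟩ := ha
      obtain ⟨q1, q2⟩ := large_to_small N a hN hdvd hgt
      have hback : N / (N / a) = a := Nat.div_div_self hdvd (by omega)
      refine ⟨⟨⟨q1, hN0⟩, q2⟩, ?_⟩
      rw [hback]; omega
    · intro a ha
      simp only [Finset.mem_filter, Nat.mem_divisors] at ha
      exact Nat.div_div_self ha.1.1.1 (by omega)
    · intro a ha
      simp only [Finset.mem_filter, Nat.mem_divisors] at ha
      exact Nat.div_div_self ha.1.1 (by omega)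
    · intro a _
      rfl
  calc ∑ i ∈ Finset.Ico 1 (Nat.sqrt N + 1), bEv N i
      = ∑ i ∈ (Finset.Ico 1 (Nat.sqrt N + 1)).filter (fun i => N % i = 0),
          (fEv N i + if N / i ≠ i then fEv N (N / i) else 0) := by
        rw [Finset.sum_filter]; simp only [bEv]
    _ = ∑ i ∈ N.divisors.filter (fun d => d ≤ Nat.sqrt N),
          (fEv N i + if N / i ≠ i then fEv N (N / i) else 0) := by rw [hsmall]
    _ = (∑ i ∈ N.divisors.filter (fun d => d ≤ Nat.sqrt N), fEv N i)
        + ∑ i ∈ N.divisors.filter (fun d => d ≤ Nat.sqrt N),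
            (if N / i ≠ i then fEv N (N / i) else 0) := Finset.sum_add_distrib
    _ = (∑ i ∈ N.divisors.filter (fun d => d ≤ Nat.sqrt N), fEv N i)
        + ∑ i ∈ (N.divisors.filter (fun d => d ≤ Nat.sqrt N)).filter (fun i => N / i ≠ i),
            fEv N (N / i) := by congr 1; exact (Finset.sum_filter _ _).symm
    _ = (∑ i ∈ N.divisors.filter (fun d => d ≤ Nat.sqrt N), fEv N i)
        + ∑ d ∈ N.divisors.filter (fun d => ¬ d ≤ Nat.sqrt N), fEv N d := by rw [step4]
    _ = ∑ d ∈ N.divisors, fEv N d :=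
        Finset.sum_filter_add_sum_filter_not N.divisors (fun d => d ≤ Nat.sqrt N) (fEv N)

theorem sum_map_range {M : Type} [AddCommMonoid M] (F : ℕ → M) (m : ℕ) :
    ((List.range m).map F).sum = ∑ k ∈ Finset.range m, F k := by
  induction m with
  | zero => simp
  | succ m ih => simp [List.range_succ, Finset.sum_range_succ, ih]

theorem modcast_N (N m : ℕ) (hm : 1 ≤ m) :
    PySem.Int.mod (N : ℤ) (m : ℤ) = ((N % m : ℕ) : ℤ) := by
  rw [PySem.Int.mod_eq_emod_of_pos (by exact_mod_cast hm : (0:ℤ) < (m:ℤ))]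
  exact (Int.natCast_mod N m).symm

theorem modcast_two (m : ℕ) :
    PySem.Int.mod (m : ℤ) 2 = ((m % 2 : ℕ) : ℤ) := by
  rw [PySem.Int.mod_eq_emod_of_pos (by norm_num : (0:ℤ) < 2)]
  exact_mod_cast (Int.natCast_mod m 2).symm

theorem gterm (N m : ℕ) (hm : 1 ≤ m) :
    (if PySem.Int.mod (N : ℤ) (m : ℤ) == 0 && PySem.Int.mod (m : ℤ) 2 == 0 then ((m : ℕ) : ℤ) else 0)
      = ((aEv N m : ℕ) : ℤ) := by
  rw [modcast_N N m hm, modcast_two m]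
  unfold aEv
  simp only [beq_iff_eq, Bool.and_eq_true, Nat.cast_eq_zero]
  split_ifs
  all_goals push_cast
  all_goals omega

theorem foldA_eq (N : ℕ) (hN : 1 ≤ N) :
    (PySem.List.pyRange 1 (N : Int) 1).foldl
      (fun acc i => if PySem.Int.mod (N : Int) i == 0 && PySem.Int.mod i 2 == 0 then acc + i else acc) 0
    = ((∑ i ∈ Finset.Ico 1 N, aEv N i : ℕ) : Int) := by
  have hfun : (fun (acc i : ℤ) => if PySem.Int.mod (N : ℤ) i == 0 && PySem.Int.mod i 2 == 0 then acc + i else acc)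
      = (fun (acc i : ℤ) => acc + (if PySem.Int.mod (N : ℤ) i == 0 && PySem.Int.mod i 2 == 0 then i else 0)) := by
    funext acc i
    split <;> simp
  rw [hfun, PySem.List.foldl_add, zero_add, PySem.List.pyRange_one, List.map_map, sum_map_range]
  have hlen : ((N : ℤ) - 1).toNat = N - 1 := by omega
  rw [hlen, Finset.sum_Ico_eq_sum_range (aEv N) 1 N, Nat.cast_sum]
  apply Finset.sum_congr rfl
  intro k _
  have : ((1 : ℤ) + (k : ℤ)) = ((1 + k : ℕ) : ℤ) := by push_cast; ring
  simp only [Function.comp_apply, this]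
  exact gterm N (1 + k) (by omega)

theorem body_eq (N m0 : ℕ) (hN : 1 ≤ N) (hm : 1 ≤ m0) (t : ℤ) :
    (if PySem.Int.mod (N:ℤ) ((m0:ℕ):ℤ) == 0 then
        let j := PySem.Int.floordiv (N:ℤ) ((m0:ℕ):ℤ)
        let t1 := if PySem.Int.mod ((m0:ℕ):ℤ) 2 == 0 && ((m0:ℕ):ℤ) != (N:ℤ) then t + ((m0:ℕ):ℤ) else t
        if j != ((m0:ℕ):ℤ) && PySem.Int.mod j 2 == 0 && j != (N:ℤ) then t1 + j else t1
      else t) = t + (bEv N m0 : ℤ) := by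
  have hj : PySem.Int.floordiv (N:ℤ) ((m0:ℕ):ℤ) = ((N / m0 : ℕ) : ℤ) := by
    rw [PySem.Int.floordiv_eq_ediv_of_pos (by exact_mod_cast hm : (0:ℤ) < ((m0:ℕ):ℤ))]
    exact (Int.natCast_div N m0).symm
  rw [modcast_N N m0 hm, hj]
  simp only [modcast_two]
  simp only [beq_iff_eq, bne_iff_ne, Bool.and_eq_true, ne_eq, Nat.cast_inj, Nat.cast_eq_zero]
  unfold bEv fEv
  split_ifs <;> push_cast <;> omega

theorem loopB_eq (N : ℕ) (hN : 1 ≤ N) (i : Int) (hi : 1 ≤ i) (t : Int) :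
    soChanAltLoop (N : Int) i t = t + ((∑ k ∈ Finset.Ico i.toNat (Nat.sqrt N + 1), bEv N k : ℕ) : Int) := by
  suffices H : ∀ (m : ℕ) (i t : Int), 1 ≤ i → Nat.sqrt N + 1 - i.toNat = m →
      soChanAltLoop (N : Int) i t = t + ((∑ k ∈ Finset.Ico i.toNat (Nat.sqrt N + 1), bEv N k : ℕ) : Int) by
    exact H _ i t hi rfl
  intro m
  induction m with
  | zero =>
    intro i t hi hm
    have hgt : Nat.sqrt N < i.toNat := by omega
    have h2 : N < i.toNat * i.toNat := by
      by_contra hc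
      push Not at hc
      exact absurd (Nat.le_sqrt.2 hc) (by omega)
    have hneg : ¬ (i * i ≤ (N:ℤ)) := by
      intro hle
      have hi' : ((i.toNat : ℕ) : ℤ) = i := by omega
      rw [← hi'] at hle
      have : (i.toNat * i.toNat : ℕ) ≤ N := by exact_mod_cast hle
      omega
    rw [soChanAltLoop, dif_neg hneg]
    rw [Finset.Ico_eq_empty (by omega)]
    simp
  | succ m ih =>
    intro i t hi hm
    have hle : i.toNat ≤ Nat.sqrt N := by omega
    have h1 : i.toNat * i.toNat ≤ N := Nat.le_sqrt.1 hle
    have hi' : ((i.toNat : ℕ) : ℤ) = i := by omega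
    have hpos : i * i ≤ (N:ℤ) := by
      rw [← hi']
      exact_mod_cast h1
    have hrec : ∀ t' : ℤ, soChanAltLoop (N : Int) (i+1) t'
        = t' + ((∑ k ∈ Finset.Ico (i+1).toNat (Nat.sqrt N + 1), bEv N k : ℕ) : Int) :=
      fun t' => ih (i+1) t' (by omega) (by omega)
    rw [soChanAltLoop, dif_pos hpos, hrec]
    have h1t : (i+1).toNat = i.toNat + 1 := by omega
    rw [h1t, Finset.sum_eq_sum_Ico_succ_bot (by omega : i.toNat < Nat.sqrt N + 1) (bEv N)]
    rw [← hi', body_eq N i.toNat hN (by omega) t]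
    simp only [Int.toNat_natCast]
    push_cast
    ring

-- ===== VERDICT (by name: the statement is the Claim_ definition above) =====
theorem so_chan_hoan_hao_spec : Claim_equal_so_chan_hoan_hao := by
  intro n _
  unfold Spec_so_chan_hoan_hao so_chan_hoan_hao so_chan_hoan_hao_alt
  by_cases hle : n ≤ 0
  · simp [hle]
  · have hN1 : 1 ≤ n.toNat := by omega
    have hcast : n = (n.toNat : Int) := by omega
    simp only [hle, if_false]
    rw [hcast, foldA_eq n.toNat hN1, loopB_eq n.toNat hN1 1 le_rfl 0,
        aEv_sum_eq n.toNat hN1]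
    simp only [Int.toNat_one]
    rw [bEv_sum_eq n.toNat hN1]
    simp
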